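-- pv_equiv track=rewrite | github.com/pypi-data/pypi-mirror-99 | packages/yautil/yautil-0.0.27-py3-none-any.whl/yautil/strutil.py | strcompare
-- ===== SOURCE A (Python) =====
-- from itertools import zip_longest
--
-- def strcompare(left: str, right: str, width: int = None, highlight: bool = True) -> str:
--     def __compose_line(ll: str, rl: str, padding: int):
--         return str('{:' + str(len(str(ll)) + padding) + '} | {}').format(str(ll), str(rl)) + '\n'
--
--     lls = left.splitlines()
--     rls = right.splitlines()
--
--     color_fmt = '\033[{0}m'
--     color_red = color_fmt.format(31)  # red
--     color_clr = color_fmt.format(0)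
--
--     if not width:
--         width = max([len(e) for e in lls])
--
--     diff = ""
--     for ll, rl in zip_longest(lls, rls):
--         ll: str
--         rl: str
--
--         padding = width - len(str(ll))
--
--         if ll == rl:
--             diff += __compose_line(ll, rl, padding)
--             continue
--
--         if highlight and ll and rl:
--             hl = False
--             i = 0
--             while i < min(len(ll), len(rl)):
--                 if (not hl) and (ll[i] != rl[i]):
--                     hl = True
--                     ll = ll[:i] + color_red + ll[i:]
--                     rl = rl[:i] + color_red + rl[i:]
--                     i += len(color_red) + 1
--                 elif (hl) and (ll[i] == rl[i]):
--                     hl = False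
--                     ll = ll[:i] + color_clr + ll[i:]
--                     rl = rl[:i] + color_clr + rl[i:]
--                     i += len(color_clr) + 1
--                 else:
--                     i += 1
--
--             if hl:
--                 ll += color_clr
--                 rl += color_clr
--
--         diff += __compose_line(ll, rl, padding)
--     return diff
-- ===== SOURCE B (Python) =====
-- def strcompare(left: str, right: str, width: int = None, highlight: bool = True) -> str:
--     color_red = '\033[31m'
--     color_clr = '\033[0m'
--
--     def _diff_runs(ll: str, rl: str, m: int):
--         # maximal intervals [a, b) with a < b <= m on which ll and rl disagree
--         runs = []
--         i = 0
--         while i < m: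
--             if ll[i] != rl[i]:
--                 j = i + 1
--                 while j < m and ll[j] != rl[j]:
--                     j += 1
--                 runs.append((i, j))
--                 i = j
--             else:
--                 i += 1
--         return runs
--
--     def _splice(s: str, runs, m: int):
--         # insert color_red before each run and color_clr at its end; a run that
--         # reaches m keeps highlighting through the tail, clearing at the very end
--         parts = []
--         pos = 0
--         tail_clr = False
--         for a, b in runs:
--             parts.append(s[pos:a])
--             parts.append(color_red)
--             if b == m:
--                 tail_clr = True
--                 pos = a
--             else:
--                 parts.append(s[a:b])
--                 parts.append(color_clr)
--                 pos = b
--         parts.append(s[pos:])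
--         if tail_clr:
--             parts.append(color_clr)
--         return ''.join(parts)
--
--     lls = left.splitlines()
--     rls = right.splitlines()
--     if not width:
--         width = max(len(e) for e in lls)
--
--     out = []
--     for k in range(max(len(lls), len(rls))):
--         ll = lls[k] if k < len(lls) else None
--         rl = rls[k] if k < len(rls) else None
--         padding = width - len(str(ll))
--         if ll != rl and highlight and ll and rl:
--             m = min(len(ll), len(rl))
--             runs = _diff_runs(ll, rl, m)
--             ll = _splice(ll, runs, m)
--             rl = _splice(rl, runs, m)
--         out.append('{:{w}}'.format(str(ll), w=len(str(ll)) + padding) + ' | ' + str(rl) + '\n')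
--     return ''.join(out)
-- ===== Notes on version B (the rewrite author's own statement) =====
-- stated objective: alternative
-- what changed: The stateful toggle-and-splice while-loop that repeatedly re-slices the growing strings at a moving index is replaced by two phases: first collect the maximal mismatch intervals [a,b) over the common prefix, then build each highlighted line once from segments (insert color_red before each interval and color_clr at its end, clearing at the very end when an interval reaches the common length); line pairing uses index-based iteration instead of zip_longest.
import Mathlib
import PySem

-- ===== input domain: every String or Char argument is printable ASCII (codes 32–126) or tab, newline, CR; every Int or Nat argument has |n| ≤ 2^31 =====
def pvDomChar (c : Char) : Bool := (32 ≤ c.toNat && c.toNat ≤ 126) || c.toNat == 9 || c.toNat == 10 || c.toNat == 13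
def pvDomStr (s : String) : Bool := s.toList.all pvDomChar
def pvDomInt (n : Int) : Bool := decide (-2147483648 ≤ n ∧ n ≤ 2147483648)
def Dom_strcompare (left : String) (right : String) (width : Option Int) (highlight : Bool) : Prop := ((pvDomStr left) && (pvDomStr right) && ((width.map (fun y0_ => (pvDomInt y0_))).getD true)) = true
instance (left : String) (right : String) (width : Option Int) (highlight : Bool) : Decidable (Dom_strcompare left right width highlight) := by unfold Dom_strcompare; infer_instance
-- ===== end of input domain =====

-- B replaces A's stateful toggle-and-splice while-loop by a two-phase build (collect the
-- maximal mismatch intervals, then assemble each line once from segments): an alternative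
-- decomposition, not claimed faster.  Equivalence is about the return value only.

-- '\033[31m' and '\033[0m' (color_fmt.format(31) / color_fmt.format(0))
def pvRed : List Char := [Char.ofNat 27, '[', '3', '1', 'm']
def pvClr : List Char := [Char.ofNat 27, '[', '0', 'm']

-- str(x) for Optional[str]: None -> "None"
def pvOptStr : Option (List Char) → List Char
  | none => ['N', 'o', 'n', 'e']
  | some s => s

-- Python truthiness of an Optional[str]
def pvTruthy : Option (List Char) → Bool
  | none => false
  | some s => !s.isEmpty

-- ===== PORT A =====
-- __compose_line: '{:N} | {}'.format(sll, srl) + '\n' with field width N = len(sll)+padding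
-- (exact for N ≥ 0; Pre_ keeps every reached N nonnegative, Python raises for N < 0)
def pvComposeA (sll srl : List Char) (field : Int) : List Char :=
  sll ++ List.replicate (field - sll.length).toNat ' ' ++ (' ' :: '|' :: ' ' :: srl) ++ ['\n']

-- length of an insertion splice (cited by pvHlLoop's termination proof)
theorem pvInsertLen (ll ins : List Char) (i : Nat) (h : i ≤ ll.length) :
    (ll.take i ++ ins ++ ll.drop i).length = ll.length + ins.length := by
  simp only [List.length_append, List.length_take, List.length_drop]
  rw [Nat.min_eq_left h]
  omega

-- the measure strictly drops after a splice (cited by pvHlLoop's termination proof)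
theorem pvSpliceDec (a b c i : Nat) (h : i < min a b) :
    min (a + c) (b + c) - (i + c + 1) < min a b - i := by
  rw [Nat.add_min_add_right]
  generalize min a b = m at h ⊢
  omega

-- the while-loop: state (ll, rl, i, hl); returns the spliced strings and the final flag
def pvHlLoop (ll rl : List Char) (i : Nat) (hl : Bool) : List Char × List Char × Bool :=
  if i < min ll.length rl.length then
    if hl = false ∧ ll.getD i ' ' ≠ rl.getD i ' ' then
      pvHlLoop (ll.take i ++ pvRed ++ ll.drop i) (rl.take i ++ pvRed ++ rl.drop i)
        (i + pvRed.length + 1) true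
    else if hl = true ∧ ll.getD i ' ' = rl.getD i ' ' then
      pvHlLoop (ll.take i ++ pvClr ++ ll.drop i) (rl.take i ++ pvClr ++ rl.drop i)
        (i + pvClr.length + 1) false
    else
      pvHlLoop ll rl (i + 1) hl
  else (ll, rl, hl)
termination_by min ll.length rl.length - i
decreasing_by
  · rw [pvInsertLen ll pvRed i (by omega), pvInsertLen rl pvRed i (by omega)]
    exact pvSpliceDec ll.length rl.length pvRed.length i (by omega)
  · rw [pvInsertLen ll pvClr i (by omega), pvInsertLen rl pvClr i (by omega)]
    exact pvSpliceDec ll.length rl.length pvClr.length i (by omega)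
  · omega

-- max([len(e) for e in lls]) (Python raises on []; outside Pre_ the port yields 0)
def pvMaxLen (lls : List (List Char)) : Int :=
  (PySem.List.max? (lls.map (fun e => (e.length : Int))) (fun x => x)).getD 0

def pvZipLongest : List (List Char) → List (List Char) → List (Option (List Char) × Option (List Char))
  | [], [] => []
  | [], y :: ys => (none, some y) :: pvZipLongest [] ys
  | x :: xs, [] => (some x, none) :: pvZipLongest xs []
  | x :: xs, y :: ys => (some x, some y) :: pvZipLongest xs ys

def pvLineA (w : Int) (highlight : Bool) (p : Option (List Char) × Option (List Char)) : List Char :=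
  let ll := p.1
  let rl := p.2
  let sll := pvOptStr ll
  let srl := pvOptStr rl
  let padding : Int := w - sll.length
  if ll = rl then pvComposeA sll srl (sll.length + padding)
  else if highlight && pvTruthy ll && pvTruthy rl then
    let r := pvHlLoop sll srl 0 false
    let l2 := if r.2.2 then r.1 ++ pvClr else r.1
    let r2 := if r.2.2 then r.2.1 ++ pvClr else r.2.1
    pvComposeA l2 r2 (l2.length + padding)
  else pvComposeA sll srl (sll.length + padding)

def strcompare (left : String) (right : String) (width : Option Int) (highlight : Bool) : String :=
  let lls := PySem.Chars.splitlines left.toList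
  let rls := PySem.Chars.splitlines right.toList
  let w : Int := match width with
    | none => pvMaxLen lls
    | some w0 => if w0 = 0 then pvMaxLen lls else w0
  String.mk ((pvZipLongest lls rls).foldl (fun diff p => diff ++ pvLineA w highlight p) [])

-- ===== PORT B =====
-- inner while of _diff_runs: advance j while chars differ
def pvRunEnd (lc rc : List Char) (m : Nat) (j : Nat) : Nat :=
  if j < m ∧ lc.getD j ' ' ≠ rc.getD j ' ' then pvRunEnd lc rc m (j + 1) else j
termination_by m - j
decreasing_by omega

-- the port of _diff_runs cites this for termination
theorem pvRunEnd_ge (lc rc : List Char) (m j : Nat) : j ≤ pvRunEnd lc rc m j := by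
  fun_induction pvRunEnd with
  | case1 j h ih => omega
  | case2 j h => omega

def pvRuns (lc rc : List Char) (m : Nat) (i : Nat) : List (Nat × Nat) :=
  if i < m then
    if lc.getD i ' ' ≠ rc.getD i ' ' then
      let j := pvRunEnd lc rc m (i + 1)
      (i, j) :: pvRuns lc rc m j
    else pvRuns lc rc m (i + 1)
  else []
termination_by m - i
decreasing_by
  · have := pvRunEnd_ge lc rc m (i + 1); omega
  · omega

-- _splice: assemble the line from segments, one pass over the runs
def pvSplice (s : List Char) (m : Nat) : List (Nat × Nat) → Nat → Bool → List Char
  | [], pos, tc => s.drop pos ++ (if tc then pvClr else [])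
  | (a, b) :: rs, pos, tc =>
      (s.take a).drop pos ++ pvRed ++
        (if b = m then pvSplice s m rs a true
         else (s.take b).drop a ++ pvClr ++ pvSplice s m rs b tc)

def pvLineB (w : Int) (highlight : Bool) (p : Option (List Char) × Option (List Char)) : List Char :=
  let ll := p.1
  let rl := p.2
  let sll := pvOptStr ll
  let srl := pvOptStr rl
  let padding : Int := w - sll.length
  if ll ≠ rl ∧ (highlight && pvTruthy ll && pvTruthy rl) then
    let lc := ll.getD []
    let rc := rl.getD []
    let m := min lc.length rc.length
    let runs := pvRuns lc rc m 0
    let l2 := pvSplice lc m runs 0 false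
    let r2 := pvSplice rc m runs 0 false
    (l2 ++ List.replicate ((l2.length + padding - l2.length)).toNat ' ') ++ (' ' :: '|' :: ' ' :: r2) ++ ['\n']
  else
    (sll ++ List.replicate ((sll.length + padding - sll.length)).toNat ' ') ++ (' ' :: '|' :: ' ' :: srl) ++ ['\n']

def strcompare_alt (left : String) (right : String) (width : Option Int) (highlight : Bool) : String :=
  let lls := PySem.Chars.splitlines left.toList
  let rls := PySem.Chars.splitlines right.toList
  let w : Int := match width with
    | none => pvMaxLen lls
    | some w0 => if w0 = 0 then pvMaxLen lls else w0
  let n := max lls.length rls.length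
  String.mk (((List.range n).map (fun k => pvLineB w highlight (lls[k]?, rls[k]?))).flatten)

-- ===== PRECONDITION & SPEC =====
-- number of maximal mismatch runs on the common prefix (a closed-form count over indices:
-- positions where the lines disagree but the previous position agrees)
def pvRunsCount (lc rc : List Char) : Nat :=
  ((List.range (min lc.length rc.length)).filter
    (fun i => (lc.getD i ' ' != rc.getD i ' ') && (i == 0 || (lc.getD (i - 1) ' ' == rc.getD (i - 1) ' ')))).length

-- one line is formatted without error under a negative width w iff it is a highlighted
-- pair of distinct non-empty lines whose 9 inserted color chars per mismatch run lift the
-- format field width w + 9*runs back to ≥ 0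
def pvLineOk (w : Int) (highlight : Bool) : Option (List Char) × Option (List Char) → Bool
  | (some a, some b) => (a != b) && highlight && (!a.isEmpty) && (!b.isEmpty)
      && decide (0 ≤ w + 9 * (pvRunsCount a b : Int))
  | _ => false

-- Pre_ excludes exactly the inputs on which A raises: a falsy width (None/0) together with
-- an empty left (max([]) raises ValueError), and a negative width whenever some line's
-- format field stays negative — str.format raises ValueError ('Sign not allowed in string
-- format specifier') there — i.e. unless every line is a highlighted pair of distinct
-- non-empty lines whose color insertions lift the field width back to ≥ 0.
def Pre_strcompare (left : String) (right : String) (width : Option Int) (highlight : Bool) : Prop :=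
  let lls := PySem.Chars.splitlines left.toList
  let rls := PySem.Chars.splitlines right.toList
  if width.getD 0 = 0 then lls ≠ []
  else if 0 < width.getD 0 then True
  else ((List.range (max lls.length rls.length)).all
        (fun k => pvLineOk (width.getD 0) highlight (lls[k]?, rls[k]?))) = true
instance (left : String) (right : String) (width : Option Int) (highlight : Bool) : Decidable (Pre_strcompare left right width highlight) := by unfold Pre_strcompare; infer_instance

def pvWitness_strcompare : String × String × Option Int × Bool := ("abc\nxy", "abd", none, true)

def Spec_strcompare (left : String) (right : String) (width : Option Int) (highlight : Bool) (out : String) : Prop := out = strcompare_alt left right width highlight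
instance (left : String) (right : String) (width : Option Int) (highlight : Bool) (out : String) : Decidable (Spec_strcompare left right width highlight out) := by unfold Spec_strcompare; infer_instance

-- ===== CLAIM (what is proved, stated in full; the proofs are below) =====
def Claim_equal_strcompare : Prop := ∀ (left : String) (right : String) (width : Option Int) (highlight : Bool), Dom_strcompare left right width highlight → Pre_strcompare left right width highlight → Spec_strcompare left right width highlight (strcompare left right width highlight)

-- ===== LEMMAS AND PROOFS =====

-- the common intermediate form of one highlighted side: a left-to-right emitter over the
-- mismatch mask e, carrying the toggle flag
def pvEmit (hl : Bool) : List Bool → List Char → List Char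
  | [], s => s ++ (if hl then pvClr else [])
  | _ :: _, [] => if hl then pvClr else []
  | d :: e, c :: s =>
      if hl = false ∧ d = true then pvRed ++ c :: pvEmit true e s
      else if hl = true ∧ d = false then pvClr ++ c :: pvEmit false e s
      else c :: pvEmit hl e s

-- the mismatch mask of the common prefix
def pvMask (S T : List Char) : List Bool := (S.zip T).map (fun p => p.1 != p.2)

theorem pvMask_length (S T : List Char) : (pvMask S T).length = min S.length T.length := by
  simp [pvMask]

theorem getD_of_lt (s : List Char) (i : Nat) (h : i < s.length) : s.getD i ' ' = s[i] := by
  simp [List.getD_eq_getElem?_getD, List.getElem?_eq_getElem h]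

theorem pvMask_getD (S T : List Char) (k : Nat) (h : k < min S.length T.length) :
    (pvMask S T).getD k false = (S.getD k ' ' != T.getD k ' ') := by
  have hk : k < ((S.zip T).map (fun p => p.1 != p.2)).length := by
    simp only [List.length_map, List.length_zip]; omega
  rw [pvMask, List.getD_eq_getElem _ _ hk]
  simp [List.getElem_zip, List.getElem?_eq_getElem (show k < S.length by omega),
    List.getElem?_eq_getElem (show k < T.length by omega)]

theorem getD_append_length (P S : List Char) (c d : Char) :
    (P ++ c :: S).getD P.length d = c := by
  induction P with
  | nil => rfl
  | cons a P ih => simpa using ih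

-- A's loop + the final 'if hl' append, in emitter form
def pvFin (r : List Char × List Char × Bool) : List Char × List Char :=
  (if r.2.2 then r.1 ++ pvClr else r.1, if r.2.2 then r.2.1 ++ pvClr else r.2.1)

theorem pvHlLoop_eq_emit (S : List Char) : ∀ (T P Q : List Char) (hl : Bool),
    P.length = Q.length →
    pvFin (pvHlLoop (P ++ S) (Q ++ T) P.length hl)
      = (P ++ pvEmit hl (pvMask S T) S, Q ++ pvEmit hl (pvMask S T) T) := by
  induction S with
  | nil =>
    intro T P Q hl hPQ
    rw [pvHlLoop]
    rw [if_neg (by simp [hPQ])]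
    cases hl <;> simp [pvMask, pvEmit, pvFin]
  | cons a S' ih =>
    intro T P Q hl hPQ
    cases T with
    | nil =>
      rw [pvHlLoop]
      rw [if_neg (by simp [hPQ])]
      cases hl <;> simp [pvMask, pvEmit, pvFin]
    | cons b T' =>
      rw [pvHlLoop]
      rw [if_pos (by simp [hPQ])]
      have hgP : (P ++ a :: S').getD P.length ' ' = a := getD_append_length P S' a ' '
      have hgQ : (Q ++ b :: T').getD P.length ' ' = b := by
        rw [hPQ]; exact getD_append_length Q T' b ' '
      simp only [hgP, hgQ]
      have hmask : pvMask (a :: S') (b :: T') = (a != b) :: pvMask S' T' := by simp [pvMask]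
      have htQ : List.take P.length (Q ++ b :: T') = Q := by rw [hPQ, List.take_left]
      have hdQ : List.drop P.length (Q ++ b :: T') = b :: T' := by rw [hPQ, List.drop_left]
      cases hl with
      | false =>
        by_cases hab : a = b
        · rw [if_neg (by simp [hab]), if_neg (by simp)]
          rw [List.append_cons P a S', List.append_cons Q b T',
            show P.length + 1 = (P ++ [a]).length by simp]
          rw [ih T' (P ++ [a]) (Q ++ [b]) false (by simp [hPQ])]
          subst hab; simp [pvMask, pvEmit]
        · rw [if_pos ⟨rfl, hab⟩]
          rw [htQ, hdQ, List.take_left, List.drop_left]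
          rw [show P ++ pvRed ++ a :: S' = P ++ pvRed ++ [a] ++ S' by simp,
            show Q ++ pvRed ++ b :: T' = Q ++ pvRed ++ [b] ++ T' by simp,
            show P.length + pvRed.length + 1 = (P ++ pvRed ++ [a]).length by simp only [List.length_append, List.length_cons, List.length_nil]]
          rw [ih T' (P ++ pvRed ++ [a]) (Q ++ pvRed ++ [b]) true (by simp [hPQ])]
          simp [hmask, hab, pvEmit]
      | true =>
        by_cases hab : a = b
        · rw [if_neg (by simp), if_pos ⟨rfl, hab⟩]
          rw [htQ, hdQ, List.take_left, List.drop_left]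
          rw [show P ++ pvClr ++ a :: S' = P ++ pvClr ++ [a] ++ S' by simp,
            show Q ++ pvClr ++ b :: T' = Q ++ pvClr ++ [b] ++ T' by simp,
            show P.length + pvClr.length + 1 = (P ++ pvClr ++ [a]).length by simp only [List.length_append, List.length_cons, List.length_nil]]
          rw [ih T' (P ++ pvClr ++ [a]) (Q ++ pvClr ++ [b]) false (by simp [hPQ])]
          subst hab; simp [pvMask, pvEmit]
        · rw [if_neg (by simp [hab]), if_neg (by simp [hab])]
          rw [List.append_cons P a S', List.append_cons Q b T',
            show P.length + 1 = (P ++ [a]).length by simp]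
          rw [ih T' (P ++ [a]) (Q ++ [b]) true (by simp [hPQ])]
          simp [hmask, hab, pvEmit]

-- small indexing helpers used by the run-scan proofs
theorem drop_cons_getD {α : Type} [Inhabited α] (l : List α) (k : Nat) (h : k < l.length) (d : α) :
    l.drop k = l.getD k d :: l.drop (k + 1) := by
  rw [List.drop_eq_getElem_cons h, List.getD_eq_getElem _ _ h]

theorem take_drop_cons (s : List Char) (i j : Nat) (h1 : i < j) (h2 : j ≤ s.length) :
    (s.take j).drop i = s.getD i ' ' :: (s.take j).drop (i + 1) := by
  have hi : i < (s.take j).length := by simp; omega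
  rw [List.drop_eq_getElem_cons hi, List.getElem_take, getD_of_lt _ _ (by omega)]

theorem drop_take_self (s : List Char) (i : Nat) : (s.take i).drop i = [] := by
  apply List.drop_eq_nil_of_le; simp

theorem take_drop_append (s : List Char) (i m : Nat) (h1 : i ≤ m) (h2 : m ≤ s.length) :
    (s.take m).drop i ++ s.drop m = s.drop i := by
  conv_rhs => rw [← List.take_append_drop m s]
  rw [List.drop_append_of_le_length (by simp; omega)]

-- run-scan facts
theorem pvRunEnd_spec (lc rc : List Char) (m j0 : Nat) : j0 ≤ m →
    j0 ≤ pvRunEnd lc rc m j0 ∧ pvRunEnd lc rc m j0 ≤ m ∧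
      (∀ k, j0 ≤ k → k < pvRunEnd lc rc m j0 → lc.getD k ' ' ≠ rc.getD k ' ') ∧
      (pvRunEnd lc rc m j0 = m ∨ lc.getD (pvRunEnd lc rc m j0) ' ' = rc.getD (pvRunEnd lc rc m j0) ' ') := by
  fun_induction pvRunEnd with
  | case1 j hcond ih =>
    intro _
    obtain ⟨h1, h2, h3, h4⟩ := ih (by omega)
    refine ⟨by omega, h2, ?_, h4⟩
    intro k hk1 hk2
    rcases Nat.eq_or_lt_of_le hk1 with h | h
    · subst h; exact hcond.2
    · exact h3 k h hk2
  | case2 j hcond =>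
    intro h0
    refine ⟨le_refl _, h0, by omega, ?_⟩
    by_cases hjm : j = m
    · exact Or.inl hjm
    · right
      by_contra hne
      exact hcond ⟨by omega, hne⟩

theorem pvRuns_bounds (lc rc : List Char) (m : Nat) : ∀ (i a b : Nat),
    (a, b) ∈ pvRuns lc rc m i → i ≤ a ∧ a < b ∧ b ≤ m := by
  intro i
  fun_induction pvRuns with
  | case1 i hi hne j ih =>
    intro a b hmem
    obtain ⟨h1, h2, _, _⟩ := pvRunEnd_spec lc rc m (i + 1) (by omega)
    rcases List.mem_cons.mp hmem with h | h
    · simp only [Prod.mk.injEq] at h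
      obtain ⟨rfl, rfl⟩ := h
      omega
    · have := ih a b h; omega
  | case2 i hi heq ih =>
    intro a b hmem
    have := ih a b hmem; omega
  | case3 i hi =>
    intro a b hmem
    simp at hmem

-- emitter through a maximal mismatch run
theorem pvEmit_true_run (lc rc s : List Char) (m j : Nat)
    (hm : m = min lc.length rc.length) (hs : m ≤ s.length) (hjm : j ≤ m)
    (hend : j = m ∨ lc.getD j ' ' = rc.getD j ' ') :
    ∀ k, k ≤ j → (∀ p, k ≤ p → p < j → lc.getD p ' ' ≠ rc.getD p ' ') →
      pvEmit true ((pvMask lc rc).drop k) (s.drop k)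
        = (s.take j).drop k ++ (if j = m then s.drop j ++ pvClr
            else pvClr ++ pvEmit false ((pvMask lc rc).drop j) (s.drop j)) := by
  have hlen : (pvMask lc rc).length = m := by rw [pvMask_length, hm]
  intro k
  induction hn : j - k generalizing k with
  | zero =>
    intro hkj _
    have hkj' : k = j := by omega
    subst hkj'
    by_cases hjm' : k = m
    · subst hjm'
      rw [List.drop_eq_nil_of_le (by omega), if_pos rfl, drop_take_self]
      simp [pvEmit]
    · rw [if_neg hjm']
      have hjm2 : k < m := by omega
      have hdm : (pvMask lc rc).drop k = false :: (pvMask lc rc).drop (k + 1) := by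
        rw [drop_cons_getD _ k (by omega) false, pvMask_getD lc rc k (by omega)]
        rcases hend with h | h
        · omega
        · rw [bne_eq_false_iff_eq.mpr h]
      have hds : s.drop k = s.getD k ' ' :: s.drop (k + 1) := drop_cons_getD s k (by omega) ' '
      rw [hdm, hds, drop_take_self]
      simp [pvEmit]
  | succ n ih =>
    intro hkj hrun
    have hkj' : k < j := by omega
    have hdm : (pvMask lc rc).drop k = true :: (pvMask lc rc).drop (k + 1) := by
      rw [drop_cons_getD _ k (by omega) false, pvMask_getD lc rc k (by omega)]
      rw [bne_iff_ne.mpr (hrun k (le_refl _) hkj')]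
    have hds : s.drop k = s.getD k ' ' :: s.drop (k + 1) := drop_cons_getD s k (by omega) ' '
    rw [hdm, hds]
    rw [show pvEmit true (true :: (pvMask lc rc).drop (k + 1)) (s.getD k ' ' :: s.drop (k + 1))
        = s.getD k ' ' :: pvEmit true ((pvMask lc rc).drop (k + 1)) (s.drop (k + 1)) by simp [pvEmit]]
    rw [ih (k + 1) (by omega) (by omega) (fun p hp1 hp2 => hrun p (by omega) hp2)]
    rw [take_drop_cons s k j hkj' (by omega), List.cons_append]

-- peeling one untouched character off the front of a splice
theorem pvSplice_peel (s : List Char) (m : Nat) (rs : List (Nat × Nat)) (i : Nat)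
    (hi : i < s.length)
    (hhead : ∀ a b rs', rs = (a, b) :: rs' → i < a ∧ a ≤ s.length) :
    pvSplice s m rs i false = s.getD i ' ' :: pvSplice s m rs (i + 1) false := by
  cases rs with
  | nil =>
    simp only [pvSplice, if_neg Bool.false_ne_true, List.append_nil]
    exact drop_cons_getD s i hi ' '
  | cons p rs' =>
    obtain ⟨a, b⟩ := p
    obtain ⟨h1, h2⟩ := hhead a b rs' rfl
    simp only [pvSplice]
    rw [take_drop_cons s i a h1 h2]
    simp

-- B's two phases equal the emitter (one side)
theorem pvSplice_eq_emit (lc rc s : List Char) (m : Nat) (hm : m = min lc.length rc.length)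
    (hs : m ≤ s.length) : ∀ (i : Nat), i ≤ m →
    pvSplice s m (pvRuns lc rc m i) i false = pvEmit false ((pvMask lc rc).drop i) (s.drop i) := by
  have hlen : (pvMask lc rc).length = m := by rw [pvMask_length, hm]
  intro i
  fun_induction pvRuns with
  | case1 i hi hne j ih =>
    intro _
    have hjdef : j = pvRunEnd lc rc m (i + 1) := rfl
    clear_value j
    have hspec := pvRunEnd_spec lc rc m (i + 1) (by omega)
    rw [← hjdef] at hspec
    obtain ⟨hj1, hj2, hj3, hj4⟩ := hspec
    have hdm : (pvMask lc rc).drop i = true :: (pvMask lc rc).drop (i + 1) := by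
      rw [drop_cons_getD _ i (by omega) false, pvMask_getD lc rc i (by omega)]
      rw [bne_iff_ne.mpr hne]
    have hds : s.drop i = s.getD i ' ' :: s.drop (i + 1) := drop_cons_getD s i (by omega) ' '
    rw [hdm, hds]
    rw [show pvEmit false (true :: (pvMask lc rc).drop (i + 1)) (s.getD i ' ' :: s.drop (i + 1))
        = pvRed ++ s.getD i ' ' :: pvEmit true ((pvMask lc rc).drop (i + 1)) (s.drop (i + 1)) by simp [pvEmit]]
    rw [pvEmit_true_run lc rc s m j hm hs hj2 hj4 (i + 1) hj1 hj3]
    simp only [pvSplice, drop_take_self, List.nil_append]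
    by_cases hjm : j = m
    · rw [if_pos hjm, if_pos hjm]
      rw [show pvRuns lc rc m j = [] by rw [pvRuns, if_neg (by omega)]]
      simp only [pvSplice]
      rw [← List.cons_append, ← take_drop_cons s i j (by omega) (by omega)]
      rw [show (s.take j).drop i ++ (s.drop j ++ pvClr) = s.drop i ++ pvClr from by
        rw [← List.append_assoc, take_drop_append s i j (by omega) (by omega)]]
      simp
    · rw [if_neg hjm, if_neg hjm]
      rw [ih (by omega)]
      rw [← List.cons_append, ← take_drop_cons s i j (by omega) (by omega)]
      simp
  | case2 i hi heq ih =>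
    intro _
    have heq' : lc.getD i ' ' = rc.getD i ' ' := not_not.mp heq
    have hdm : (pvMask lc rc).drop i = false :: (pvMask lc rc).drop (i + 1) := by
      rw [drop_cons_getD _ i (by omega) false, pvMask_getD lc rc i (by omega)]
      rw [bne_eq_false_iff_eq.mpr heq']
    have hds : s.drop i = s.getD i ' ' :: s.drop (i + 1) := drop_cons_getD s i (by omega) ' '
    rw [hdm, hds]
    rw [show pvEmit false (false :: (pvMask lc rc).drop (i + 1)) (s.getD i ' ' :: s.drop (i + 1))
        = s.getD i ' ' :: pvEmit false ((pvMask lc rc).drop (i + 1)) (s.drop (i + 1)) by simp [pvEmit]]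
    rw [← ih (by omega)]
    exact pvSplice_peel s m (pvRuns lc rc m (i + 1)) i (by omega)
      (fun a b rs' hrs => by
        have := pvRuns_bounds lc rc m (i + 1) a b (by rw [hrs]; exact List.mem_cons_self ..)
        omega)
  | case3 i hi =>
    intro him
    rw [show List.drop i (pvMask lc rc) = [] from List.drop_eq_nil_of_le (by omega)]
    simp [pvSplice, pvEmit]

-- per-line agreement
theorem pvLine_eq (w : Int) (highlight : Bool) (p : Option (List Char) × Option (List Char)) :
    pvLineA w highlight p = pvLineB w highlight p := by
  obtain ⟨ll, rl⟩ := p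
  by_cases hheq : ll = rl
  · simp [pvLineA, pvLineB, hheq, pvComposeA]
  · by_cases hhl : (highlight && pvTruthy ll && pvTruthy rl) = true
    · cases ll with
      | none => simp [pvTruthy] at hhl
      | some a =>
        cases rl with
        | none => simp [pvTruthy] at hhl
        | some b =>
          have hA := pvHlLoop_eq_emit a b [] [] false rfl
          simp only [List.nil_append, List.length_nil] at hA
          have hBl := pvSplice_eq_emit a b a (min a.length b.length) rfl (by omega) 0 (by omega)
          have hBr := pvSplice_eq_emit a b b (min a.length b.length) rfl (by omega) 0 (by omega)
          simp only [List.drop_zero] at hBl hBr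
          have hfin : pvFin (pvHlLoop a b 0 false)
              = (pvSplice a (min a.length b.length) (pvRuns a b (min a.length b.length) 0) 0 false,
                 pvSplice b (min a.length b.length) (pvRuns a b (min a.length b.length) 0) 0 false) := by
            rw [hA, hBl, hBr]
          have h1 := congrArg Prod.fst hfin
          have h2 := congrArg Prod.snd hfin
          simp only [pvFin] at h1 h2
          simp only [pvLineA, pvLineB, hhl, hheq, pvOptStr, pvComposeA]
          simp [h1, h2, hheq]
    · simp [pvLineA, pvLineB, hheq, hhl, pvComposeA]

-- the two line iterations enumerate the same pairs
theorem pvZipLongest_eq_range (xs : List (List Char)) : ∀ (ys : List (List Char)),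
    pvZipLongest xs ys
      = (List.range (max xs.length ys.length)).map (fun k => (xs[k]?, ys[k]?)) := by
  induction xs with
  | nil =>
    intro ys
    induction ys with
    | nil => simp [pvZipLongest]
    | cons y ys ihy =>
      rw [pvZipLongest]
      rw [show max ([] : List (List Char)).length (y :: ys).length
          = max ([] : List (List Char)).length ys.length + 1 by simp]
      rw [List.range_succ_eq_map, List.map_cons, List.map_map]
      refine congrArg₂ List.cons (by simp) ?_
      rw [ihy]
      exact List.map_congr_left (fun k _ => by simp [Function.comp])
  | cons x xs ihx =>
    intro ys
    cases ys with
    | nil =>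
      rw [pvZipLongest]
      rw [show max (x :: xs).length ([] : List (List Char)).length
          = max xs.length ([] : List (List Char)).length + 1 by simp]
      rw [List.range_succ_eq_map, List.map_cons, List.map_map]
      refine congrArg₂ List.cons (by simp) ?_
      rw [ihx []]
      exact List.map_congr_left (fun k _ => by simp [Function.comp])
    | cons y ys =>
      rw [pvZipLongest]
      rw [show max (x :: xs).length (y :: ys).length = max xs.length ys.length + 1 by
        simp [Nat.succ_max_succ]]
      rw [List.range_succ_eq_map, List.map_cons, List.map_map]
      refine congrArg₂ List.cons (by simp) ?_
      rw [ihx ys]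
      exact List.map_congr_left (fun k _ => by simp [Function.comp])

-- ===== VERDICT (by name: the statement is the Claim_ definition above) =====
theorem strcompare_spec : Claim_equal_strcompare := by
  intro left right width highlight _ _
  unfold Spec_strcompare strcompare strcompare_alt
  simp only []
  rw [List.foldl_append_eq_append, List.nil_append, pvZipLongest_eq_range, List.map_map]
  exact congrArg String.mk (congrArg List.flatten
    (List.map_congr_left (fun k _ => pvLine_eq _ highlight _)))
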